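-- pv_equiv track=rewrite | github.com/23andMe/bonsaitree | bonsaitree/v3/pedigrees.py | get_first_open_ancestor_set
-- ===== SOURCE A (Python) =====
-- def get_rel_deg_dict(
--     node_dict : dict[int, dict[int, int]],
--     i : int,
-- ):
--     """
--     If node_dict is an up_dict, get a dict mapping each ancestor
--     of i (including i) to its degree from i, where the degree
--     is the shortest degree over all possible paths.
--
--     If node_dict is a down_dict, get a similar dict mapping
--     each descendant of i to its degree to i
--
--     up_node_dict : {i : {anc_1 : deg_1, anc_2 : deg_2}, ...}
--     or
--     down_node_dict : {i : {anc_1 : deg_1, anc_2 : deg_2}, ...}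
--
--     deg_dict : {r1 : d1, r2 : d2, ...}
--     """
--
--     deg_dict = {i : 0}
--     for r1,d1 in node_dict.get(i,{}).items():
--
--         r1_deg_dict = get_rel_deg_dict(node_dict, r1)
--         for r2,d2 in r1_deg_dict.items():
--             if r2 in deg_dict:
--                 deg_dict[r2] = min(d1+d2, deg_dict[r2])
--             else:
--                 deg_dict[r2] = d1+d2
--
--     return deg_dict
--
-- def get_first_open_ancestor_set(
--     up_dct: dict[int, dict[int, int]],
--     node: int,
-- ):
--     """
--     Find the most recent ancestor(s) of node
--     including node itself who have at most
--     one parent.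
--
--     Args:
--         up_dct: an up node dict of the form
--             {node: {p1 : d1, p2 : d2}, ...}
--             values may have 0, 1, or 2 keys
--         node: node in question
--
--     Returns:
--         open_anc_set: set of most recent
--             ancestors of node including node
--             itself with at most one
--             parent.
--     """
--     anc_deg_dict = get_rel_deg_dict(
--         node_dict=up_dct,
--         i=node,
--     )
--
--     # sort ancestors by degree to node
--     sorted_anc_deg_list = sorted(anc_deg_dict.items(), key=lambda x: x[1])
--
--     min_deg = 0
--     open_anc_set = set()
--     for anc, deg in sorted_anc_deg_list:
--         pid_dict = up_dct.get(anc, {})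
--         num_pids = len(pid_dict)
--
--         is_open = num_pids < 2
--         is_first_entry = not open_anc_set
--         has_min_deg = deg == min_deg
--
--         if is_open and (is_first_entry or has_min_deg):
--             open_anc_set.add(anc)
--             min_deg = deg
--
--     return open_anc_set
-- ===== SOURCE B (Python) =====
-- def get_first_open_ancestor_set(
--     up_dct: dict[int, dict[int, int]],
--     node: int,
-- ):
--     # Memoized shortest-degree computation: each node's ancestor-degree dict
--     # is computed once and cached.
--     memo = {}
--
--     def deg(i):
--         if i in memo:
--             return memo[i]
--         d = {i: 0}
--         for r1, d1 in up_dct.get(i, {}).items():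
--             for r2, d2 in deg(r1).items():
--                 s = d1 + d2
--                 if r2 not in d or s < d[r2]:
--                     d[r2] = s
--         memo[i] = d
--         return d
--
--     anc = deg(node)
--     ranked = sorted(anc.items(), key=lambda x: x[1])
--     opens = [(a, dg) for a, dg in ranked if len(up_dct.get(a, {})) < 2]
--     if not opens:
--         return set()
--     m = opens[0][1]
--     return {a for a, dg in opens if dg == m}
-- ===== Notes on version B (the rewrite author's own statement) =====
-- stated objective: alternative
-- what changed: B memoizes the ancestor-degree recursion (each node's degree dict is computed once and cached) and replaces A's stateful sorted-scan selection by a filter of the sorted open ancestors keyed to the first (minimal) open degree.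
import Mathlib
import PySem

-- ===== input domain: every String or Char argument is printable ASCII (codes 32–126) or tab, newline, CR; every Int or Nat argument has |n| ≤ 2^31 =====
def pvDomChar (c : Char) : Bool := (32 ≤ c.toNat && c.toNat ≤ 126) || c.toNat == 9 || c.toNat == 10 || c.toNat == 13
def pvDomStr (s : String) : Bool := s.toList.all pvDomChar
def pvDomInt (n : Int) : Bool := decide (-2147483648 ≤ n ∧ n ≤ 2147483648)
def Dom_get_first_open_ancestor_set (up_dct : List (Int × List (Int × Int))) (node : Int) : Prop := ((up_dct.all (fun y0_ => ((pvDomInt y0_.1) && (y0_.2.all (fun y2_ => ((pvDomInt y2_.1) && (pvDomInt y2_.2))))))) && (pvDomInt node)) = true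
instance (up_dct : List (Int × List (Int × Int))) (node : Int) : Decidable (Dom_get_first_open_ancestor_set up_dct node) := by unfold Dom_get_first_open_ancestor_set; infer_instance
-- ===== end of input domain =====

-- B memoizes A's unmemoized ancestor-degree recursion (each node's degree dict is computed once) and
-- selects the minimal-degree open ancestors by a filter instead of A's stateful scan; the claim covers
-- all up-dicts with no parent-cycle reachable from `node` (elsewhere the Python A never returns).

-- ===== PORT A =====

-- `up_dct.get(i, {})` (first-match association-list lookup, like Python's dict)
def pvParents (up : List (Int × List (Int × Int))) (i : Int) : List (Int × Int) :=
  (PySem.Dict.mk up).getD i []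

-- fuel bound used by both ports: 1 + total number of parent entries; under Pre_ the recursion
-- depth never exceeds it (a totality guard for the structural recursion, not an algorithm change)
def pvBound (up : List (Int × List (Int × Int))) : Nat :=
  (up.map (fun p => p.2.length)).sum + 1

-- `num_pids < 2` test on `up_dct.get(anc, {})`
def pvIsOpen (up : List (Int × List (Int × Int))) (a : Int) : Bool :=
  decide (((PySem.Dict.mk up).getD a []).length < 2)

-- body of A's inner loop: `if r2 in deg_dict: deg_dict[r2] = min(d1+d2, deg_dict[r2]) else: deg_dict[r2] = d1+d2`
def pvAIn (p : Int × Int) (dd2 : PySem.Dict Int Int) (q : Int × Int) : PySem.Dict Int Int :=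
  match dd2.get? q.1 with
  | some v => dd2.insert q.1 (min (p.2 + q.2) v)
  | none => dd2.insert q.1 (p.2 + q.2)

-- literal port of get_rel_deg_dict (fuel = totality guard; fuel 0, unreached under Pre_, returns {})
def pvRelDeg (up : List (Int × List (Int × Int))) : Nat → Int → PySem.Dict Int Int
  | 0, _ => PySem.Dict.empty
  | f + 1, i =>
    (pvParents up i).foldl
      (fun dd p => (pvRelDeg up f p.1).items.foldl (pvAIn p) dd)
      (PySem.Dict.mk [(i, 0)])

-- body of A's selection loop over the sorted (anc, deg) list; state = (min_deg, open_anc_set)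
def pvSelStep (up : List (Int × List (Int × Int))) (st : Int × PySem.Set Int) (ad : Int × Int) :
    Int × PySem.Set Int :=
  let is_open := pvIsOpen up ad.1
  let is_first_entry := st.2.isEmpty
  let has_min_deg := ad.2 == st.1
  if is_open && (is_first_entry || has_min_deg) then (ad.2, PySem.Set.add st.2 ad.1) else st

def get_first_open_ancestor_set (up_dct : List (Int × List (Int × Int))) (node : Int) : List Int :=
  let anc_deg_dict := pvRelDeg up_dct (pvBound up_dct) node
  let sorted_anc_deg_list := PySem.List.sorted anc_deg_dict.items (fun x => x.2) false
  (sorted_anc_deg_list.foldl (pvSelStep up_dct) (0, PySem.Set.empty)).2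

-- ===== PORT B =====

-- body of Source B's inner loop: `if r2 not in d or s < d[r2]: d[r2] = s`
def pvBIn (p : Int × Int) (dd : PySem.Dict Int Int) (q : Int × Int) : PySem.Dict Int Int :=
  match dd.get? q.1 with
  | some v => if p.2 + q.2 < v then dd.insert q.1 (p.2 + q.2) else dd
  | none => dd.insert q.1 (p.2 + q.2)

-- memoized degree recursion (Source B's `deg`), threading the memo dict; same fuel guard as A's port
def pvDegB (up : List (Int × List (Int × Int))) :
    Nat → PySem.Dict Int (PySem.Dict Int Int) → Int →
    PySem.Dict Int (PySem.Dict Int Int) × PySem.Dict Int Int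
  | 0, memo, _ => (memo, PySem.Dict.empty)
  | f + 1, memo, i =>
    match memo.get? i with
    | some c => (memo, c)
    | none =>
      let r :=
        (pvParents up i).foldl
          (fun (st : PySem.Dict Int (PySem.Dict Int Int) × PySem.Dict Int Int) p =>
            let mr := pvDegB up f st.1 p.1
            (mr.1, mr.2.items.foldl (pvBIn p) st.2))
          (memo, PySem.Dict.mk [(i, 0)])
      (r.1.insert i r.2, r.2)

def get_first_open_ancestor_set_alt (up_dct : List (Int × List (Int × Int))) (node : Int) : List Int :=
  let anc := (pvDegB up_dct (pvBound up_dct) PySem.Dict.empty node).2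
  let ranked := PySem.List.sorted anc.items (fun x => x.2) false
  let opens := ranked.filter (fun ad => pvIsOpen up_dct ad.1)
  match opens with
  | [] => []
  | o :: _ => PySem.Set.ofList ((opens.filter (fun ad => ad.2 == o.2)).map (fun ad => ad.1))

-- ===== PRECONDITION & SPEC =====

-- one step of parent-reachability closure
def pvExpand (up : List (Int × List (Int × Int))) (S : Finset Int) : Finset Int :=
  S ∪ S.biUnion (fun j => ((pvParents up j).map (fun q => q.1)).toFinset)

def pvIterExpand (up : List (Int × List (Int × Int))) : Nat → Finset Int → Finset Int
  | 0, S => S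
  | n + 1, S => pvIterExpand up n (pvExpand up S)

-- all ancestors of i (including i) through the parent map
def pvReach (up : List (Int × List (Int × Int))) (i : Int) : Finset Int :=
  pvIterExpand up (pvBound up) {i}

-- Pre_ excludes exactly the up-dicts with a parent-cycle reachable from `node`: there the Python A's
-- unmemoized recursion never returns (it hits the recursion limit), so nothing is claimed about them.
def Pre_get_first_open_ancestor_set (up_dct : List (Int × List (Int × Int))) (node : Int) : Prop :=
  ∀ j ∈ pvReach up_dct node, ∀ q ∈ (pvParents up_dct j).map (fun q => q.1), j ∉ pvReach up_dct q

instance (up_dct : List (Int × List (Int × Int))) (node : Int) : Decidable (Pre_get_first_open_ancestor_set up_dct node) := by unfold Pre_get_first_open_ancestor_set; infer_instance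

def pvWitness_get_first_open_ancestor_set : (List (Int × List (Int × Int))) × Int :=
  ([(1, [(2, 1), (3, 1)]), (2, [])], 1)

def Spec_get_first_open_ancestor_set (up_dct : List (Int × List (Int × Int))) (node : Int) (out : List Int) : Prop := out = get_first_open_ancestor_set_alt up_dct node
instance (up_dct : List (Int × List (Int × Int))) (node : Int) (out : List Int) : Decidable (Spec_get_first_open_ancestor_set up_dct node out) := by unfold Spec_get_first_open_ancestor_set; infer_instance

-- ===== CLAIM (what is proved, stated in full; the proofs are below) =====
def Claim_equal_get_first_open_ancestor_set : Prop := ∀ (up_dct : List (Int × List (Int × Int))) (node : Int), Dom_get_first_open_ancestor_set up_dct node → Pre_get_first_open_ancestor_set up_dct node → Spec_get_first_open_ancestor_set up_dct node (get_first_open_ancestor_set up_dct node)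

-- ===== LEMMAS AND PROOFS =====

-- ---- reachability-closure toolkit ----

theorem pv_subset_expand (up : List (Int × List (Int × Int))) (S : Finset Int) :
    S ⊆ pvExpand up S := Finset.subset_union_left

theorem pv_expand_mono (up : List (Int × List (Int × Int))) {S T : Finset Int} (h : S ⊆ T) :
    pvExpand up S ⊆ pvExpand up T := by
  unfold pvExpand
  exact Finset.union_subset_union h (Finset.biUnion_subset_biUnion_of_subset_left _ h)

theorem pv_iter_succ' (up : List (Int × List (Int × Int))) (n : Nat) (S : Finset Int) :
    pvIterExpand up (n + 1) S = pvExpand up (pvIterExpand up n S) := by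
  induction n generalizing S with
  | zero => rfl
  | succ n ih =>
    show pvIterExpand up (n + 1) (pvExpand up S) = _
    rw [ih]
    rfl

theorem pv_iter_mono (up : List (Int × List (Int × Int))) (n : Nat) {S T : Finset Int}
    (h : S ⊆ T) : pvIterExpand up n S ⊆ pvIterExpand up n T := by
  induction n generalizing S T with
  | zero => exact h
  | succ n ih => exact ih (pv_expand_mono up h)

theorem pv_subset_iter (up : List (Int × List (Int × Int))) (n : Nat) (S : Finset Int) :
    S ⊆ pvIterExpand up n S := by
  induction n with
  | zero => exact fun _ h => h
  | succ n ih => rw [pv_iter_succ']; exact ih.trans (pv_subset_expand up _)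

theorem pv_iter_subset_closed (up : List (Int × List (Int × Int))) (n : Nat) {S : Finset Int}
    (h : pvExpand up S ⊆ S) : pvIterExpand up n S ⊆ S := by
  induction n with
  | zero => exact fun _ h => h
  | succ n ih => rw [pv_iter_succ']; exact (pv_expand_mono up ih).trans h

theorem pv_iter_fixed (up : List (Int × List (Int × Int))) (n : Nat) {S : Finset Int}
    (h : pvExpand up S = S) : pvIterExpand up n S = S := by
  induction n with
  | zero => rfl
  | succ n ih => rw [pv_iter_succ', ih, h]

theorem pv_iter_add (up : List (Int × List (Int × Int))) (m n : Nat) (S : Finset Int) :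
    pvIterExpand up (n + m) S = pvIterExpand up m (pvIterExpand up n S) := by
  induction m with
  | zero => rfl
  | succ m ih => rw [← Nat.add_assoc, pv_iter_succ', ih, ← pv_iter_succ']

-- every parent list is one of up's values
theorem pv_parents_cases (up : List (Int × List (Int × Int))) (j : Int) :
    pvParents up j = [] ∨ (j, pvParents up j) ∈ up := by
  unfold pvParents
  rw [PySem.Dict.getD_eq_get?_getD]
  cases h : (PySem.Dict.mk up).get? j with
  | none => left; rfl
  | some v =>
    right
    have hm := PySem.Dict.mem_items_of_get?_eq_some _ h
    simpa [PySem.Dict.items] using hm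

-- the universe every closure iterate stays in
def pvUniv (up : List (Int × List (Int × Int))) (i : Int) : Finset Int :=
  insert i ((up.flatMap (fun p => p.2.map (fun q => q.1))).toFinset)

theorem pv_parents_subset_univ (up : List (Int × List (Int × Int))) (i j : Int) :
    ((pvParents up j).map (fun q => q.1)).toFinset ⊆ pvUniv up i := by
  rcases pv_parents_cases up j with h | h
  · simp [h]
  · intro x hx
    simp only [List.mem_toFinset, List.mem_map] at hx
    obtain ⟨q, hq, rfl⟩ := hx
    unfold pvUniv
    apply Finset.mem_insert_of_mem
    simp only [List.mem_toFinset, List.mem_flatMap, List.mem_map]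
    exact ⟨_, h, q, hq, rfl⟩

theorem pv_expand_univ (up : List (Int × List (Int × Int))) (i : Int) {S : Finset Int}
    (h : S ⊆ pvUniv up i) : pvExpand up S ⊆ pvUniv up i := by
  unfold pvExpand
  apply Finset.union_subset h
  apply Finset.biUnion_subset.2
  intro j _
  exact pv_parents_subset_univ up i j

theorem pv_iter_univ (up : List (Int × List (Int × Int))) (i : Int) (n : Nat) :
    pvIterExpand up n {i} ⊆ pvUniv up i := by
  induction n with
  | zero =>
    intro x hx
    simp only [pvIterExpand, Finset.mem_singleton] at hx
    subst hx
    exact Finset.mem_insert_self _ _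
  | succ n ih => rw [pv_iter_succ']; exact pv_expand_univ up i ih

theorem pv_univ_card (up : List (Int × List (Int × Int))) (i : Int) :
    (pvUniv up i).card ≤ pvBound up := by
  unfold pvUniv pvBound
  have h1 := Finset.card_insert_le i ((up.flatMap (fun p => p.2.map (fun q => q.1))).toFinset)
  have h2 := List.toFinset_card_le (up.flatMap (fun p => p.2.map (fun q => q.1)))
  have h3 : (up.flatMap (fun p => p.2.map (fun q => q.1))).length
      = (up.map (fun p => p.2.length)).sum := by
    simp [List.length_flatMap]
  omega

theorem pv_reach_closed (up : List (Int × List (Int × Int))) (i : Int) :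
    pvExpand up (pvReach up i) = pvReach up i := by
  by_cases hex : ∃ k, k < pvBound up ∧ pvExpand up (pvIterExpand up k {i}) = pvIterExpand up k {i}
  · obtain ⟨k, hk, hfix⟩ := hex
    have hre : pvReach up i = pvIterExpand up k {i} := by
      unfold pvReach
      have hb : pvBound up = k + (pvBound up - k) := by omega
      rw [hb, pv_iter_add]
      exact pv_iter_fixed up _ hfix
    rw [hre]; exact hfix
  · exfalso
    push Not at hex
    have grow : ∀ k, k ≤ pvBound up → k + 1 ≤ (pvIterExpand up k {i}).card := by
      intro k
      induction k with
      | zero => intro _; simp [pvIterExpand]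
      | succ k ih =>
        intro hk
        have h1 := ih (by omega)
        have hss : pvIterExpand up k {i} ⊂ pvIterExpand up (k + 1) {i} := by
          rw [pv_iter_succ']
          refine ⟨pv_subset_expand up _, ?_⟩
          intro hsub
          exact hex k (by omega) (le_antisymm hsub (pv_subset_expand up _))
        have h2 := Finset.card_lt_card hss
        omega
    have h1 := grow (pvBound up) le_rfl
    have h2 := Finset.card_le_card (pv_iter_univ up i (pvBound up))
    have h3 := pv_univ_card up i
    omega

theorem pv_mem_reach_self (up : List (Int × List (Int × Int))) (i : Int) :
    i ∈ pvReach up i :=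
  pv_subset_iter up _ _ (Finset.mem_singleton_self i)

theorem pv_reach_parent_mem (up : List (Int × List (Int × Int))) {i j q : Int}
    (h : j ∈ pvReach up i) (hq : q ∈ (pvParents up j).map (fun q => q.1)) :
    q ∈ pvReach up i := by
  rw [← pv_reach_closed up i]
  unfold pvExpand
  apply Finset.mem_union_right
  exact Finset.mem_biUnion.2 ⟨j, h, by simpa using hq⟩

theorem pv_reach_subset (up : List (Int × List (Int × Int))) {i q : Int}
    (hq : q ∈ pvReach up i) : pvReach up q ⊆ pvReach up i := by
  have h1 : ({q} : Finset Int) ⊆ pvReach up i := by simpa using hq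
  calc pvReach up q ⊆ pvIterExpand up (pvBound up) (pvReach up i) :=
        pv_iter_mono up _ h1
    _ ⊆ pvReach up i := pv_iter_subset_closed up _ (le_of_eq (pv_reach_closed up i))

def pvMu (up : List (Int × List (Int × Int))) (i : Int) : Nat := (pvReach up i).card

theorem pv_mu_pos (up : List (Int × List (Int × Int))) (i : Int) : 1 ≤ pvMu up i :=
  Finset.card_pos.2 ⟨i, pv_mem_reach_self up i⟩

theorem pv_mu_le_bound (up : List (Int × List (Int × Int))) (i : Int) :
    pvMu up i ≤ pvBound up :=
  le_trans (Finset.card_le_card (pv_iter_univ up i _)) (pv_univ_card up i)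

theorem pv_mu_lt (up : List (Int × List (Int × Int))) {node i q : Int}
    (hpre : Pre_get_first_open_ancestor_set up node)
    (hi : i ∈ pvReach up node) (hq : q ∈ (pvParents up i).map (fun q => q.1)) :
    pvMu up q < pvMu up i := by
  apply Finset.card_lt_card
  constructor
  · exact pv_reach_subset up (pv_reach_parent_mem up (pv_mem_reach_self up i) hq)
  · intro hsub
    exact hpre i hi q hq (hsub (pv_mem_reach_self up i))

-- ---- dict-step lemmas ----

theorem pv_insert_self_eq (d : PySem.Dict Int Int) (k v : Int)
    (h : d.get? k = some v) (hn : d.keys.Nodup) : d.insert k v = d := by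
  have hc : d.contains k = true := by
    rw [PySem.Dict.contains_eq_isSome_get?, h]; rfl
  apply PySem.Dict.ext
  rw [PySem.Dict.items_insert_of_contains (h := hc)]
  have hid : ∀ p ∈ d.items, (if (p.1 == k) = true then (k, v) else p) = p := by
    intro p hp
    split_ifs with hpk
    · have hpk' : p.1 = k := by exact_mod_cast beq_iff_eq.mp hpk
      have hg := PySem.Dict.get?_of_mem_items (d := d) (k := p.1) (v := p.2)
        (by simpa using hp) hn
      rw [hpk', h] at hg
      obtain ⟨p1, p2⟩ := p
      simp at hpk' hg ⊢
      exact ⟨hpk'.symm, hg⟩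
    · rfl
  calc List.map (fun p => if (p.1 == k) = true then (k, v) else p) d.items
      = List.map id d.items := List.map_congr_left (by simpa using hid)
    _ = d.items := List.map_id d.items

theorem pv_AIn_nodup (p : Int × Int) (dd : PySem.Dict Int Int) (q : Int × Int)
    (hn : dd.keys.Nodup) : (pvAIn p dd q).keys.Nodup := by
  unfold pvAIn
  cases h : dd.get? q.1 <;> exact PySem.Dict.nodup_keys_insert _ _ _ hn

theorem pv_innerA_nodup (p : Int × Int) :
    ∀ (its : List (Int × Int)) (dd : PySem.Dict Int Int), dd.keys.Nodup →
      (its.foldl (pvAIn p) dd).keys.Nodup := by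
  intro its
  induction its with
  | nil => intro dd hn; exact hn
  | cons q t ih => intro dd hn; exact ih _ (pv_AIn_nodup p dd q hn)

theorem pv_BIn_eq_AIn (p : Int × Int) (dd : PySem.Dict Int Int) (q : Int × Int)
    (hn : dd.keys.Nodup) : pvBIn p dd q = pvAIn p dd q := by
  unfold pvAIn pvBIn
  cases h : dd.get? q.1 with
  | none => rfl
  | some v =>
    show (if p.2 + q.2 < v then dd.insert q.1 (p.2 + q.2) else dd)
        = dd.insert q.1 (min (p.2 + q.2) v)
    split_ifs with hlt
    · rw [min_eq_left (le_of_lt hlt)]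
    · rw [min_eq_right (by omega)]
      exact (pv_insert_self_eq dd q.1 v h hn).symm

theorem pv_inner_eq (p : Int × Int) :
    ∀ (its : List (Int × Int)) (dd : PySem.Dict Int Int), dd.keys.Nodup →
      its.foldl (pvBIn p) dd = its.foldl (pvAIn p) dd := by
  intro its
  induction its with
  | nil => intro dd _; rfl
  | cons q t ih =>
    intro dd hn
    show List.foldl (pvBIn p) (pvBIn p dd q) t = List.foldl (pvAIn p) (pvAIn p dd q) t
    rw [pv_BIn_eq_AIn p dd q hn]
    exact ih _ (pv_AIn_nodup p dd q hn)

theorem pv_relDeg_nodup (up : List (Int × List (Int × Int))) :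
    ∀ (f : Nat) (i : Int), (pvRelDeg up f i).keys.Nodup := by
  intro f
  induction f with
  | zero => intro i; simp [pvRelDeg, PySem.Dict.keys, PySem.Dict.empty]
  | succ f _ =>
    intro i
    show ((pvParents up i).foldl _ (PySem.Dict.mk [(i, 0)])).keys.Nodup
    have : ∀ (l : List (Int × Int)) (dd : PySem.Dict Int Int), dd.keys.Nodup →
        (l.foldl (fun dd p => (pvRelDeg up f p.1).items.foldl (pvAIn p) dd) dd).keys.Nodup := by
      intro l
      induction l with
      | nil => intro dd hn; exact hn
      | cons p t ih => intro dd hn; exact ih _ (pv_innerA_nodup p _ dd hn)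
    exact this _ _ (by simp [PySem.Dict.keys])

-- ---- fuel stability of A's recursion under Pre_ ----

theorem pv_relDeg_stable (up : List (Int × List (Int × Int))) (node : Int)
    (hpre : Pre_get_first_open_ancestor_set up node) :
    ∀ (n : Nat) (i : Int), i ∈ pvReach up node → pvMu up i ≤ n →
      ∀ f g, pvMu up i ≤ f → pvMu up i ≤ g → pvRelDeg up f i = pvRelDeg up g i := by
  intro n
  induction n with
  | zero => intro i _ hn; have := pv_mu_pos up i; omega
  | succ n ih =>
    intro i hi hn f g hf hg
    have hpos := pv_mu_pos up i
    obtain ⟨f', rfl⟩ : ∃ f', f = f' + 1 := ⟨f - 1, by omega⟩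
    obtain ⟨g', rfl⟩ : ∃ g', g = g' + 1 := ⟨g - 1, by omega⟩
    show (pvParents up i).foldl _ _ = (pvParents up i).foldl _ _
    apply PySem.List.foldl_congr_mem
    intro acc p hp
    have hq : p.1 ∈ (pvParents up i).map (fun q => q.1) :=
      List.mem_map_of_mem hp
    have hlt := pv_mu_lt up hpre hi hq
    have hmem := pv_reach_parent_mem up hi hq
    rw [ih p.1 hmem (by omega) f' g' (by omega) (by omega)]

-- ---- the memoized recursion computes A's degree dicts ----

def pvInv (up : List (Int × List (Int × Int)))
    (memo : PySem.Dict Int (PySem.Dict Int Int)) : Prop :=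
  ∀ k v, memo.get? k = some v → v = pvRelDeg up (pvMu up k) k

theorem pv_degB_spec (up : List (Int × List (Int × Int))) (node : Int)
    (hpre : Pre_get_first_open_ancestor_set up node) :
    ∀ (f : Nat) (i : Int) (memo : PySem.Dict Int (PySem.Dict Int Int)),
      i ∈ pvReach up node → pvMu up i ≤ f → pvInv up memo →
      (pvDegB up f memo i).2 = pvRelDeg up (pvMu up i) i ∧ pvInv up (pvDegB up f memo i).1 := by
  intro f
  induction f with
  | zero => intro i memo _ hf _; have := pv_mu_pos up i; omega
  | succ f ih =>
    intro i memo hi hf hinv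
    have hpos := pv_mu_pos up i
    obtain ⟨m, hm⟩ : ∃ m, pvMu up i = m + 1 := ⟨pvMu up i - 1, by omega⟩
    cases hmi : memo.get? i with
    | some c =>
      have h1 : pvDegB up (f + 1) memo i = (memo, c) := by
        simp only [pvDegB, hmi]
      rw [h1]
      exact ⟨hinv i c hmi, hinv⟩
    | none =>
      have key : ∀ (l : List (Int × Int)), (∀ p ∈ l, p ∈ pvParents up i) →
          ∀ (mo : PySem.Dict Int (PySem.Dict Int Int)) (d : PySem.Dict Int Int),
            pvInv up mo → d.keys.Nodup →
          (l.foldl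
              (fun (st : PySem.Dict Int (PySem.Dict Int Int) × PySem.Dict Int Int) p =>
                (( pvDegB up f st.1 p.1).1,
                 (pvDegB up f st.1 p.1).2.items.foldl (pvBIn p) st.2)) (mo, d)).2
            = l.foldl (fun dd p => (pvRelDeg up m p.1).items.foldl (pvAIn p) dd) d
          ∧ pvInv up (l.foldl
              (fun (st : PySem.Dict Int (PySem.Dict Int Int) × PySem.Dict Int Int) p =>
                ((pvDegB up f st.1 p.1).1,
                 (pvDegB up f st.1 p.1).2.items.foldl (pvBIn p) st.2)) (mo, d)).1 := by
        intro l
        induction l with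
        | nil => intro _ mo d hmo _; exact ⟨rfl, hmo⟩
        | cons p t iht =>
          intro hl mo d hmo hnd
          have hpmem : p ∈ pvParents up i := hl p (List.mem_cons_self)
          have hq : p.1 ∈ (pvParents up i).map (fun q => q.1) := List.mem_map_of_mem hpmem
          have hlt := pv_mu_lt up hpre hi hq
          have hmem := pv_reach_parent_mem up hi hq
          obtain ⟨hval, hmo'⟩ := ih p.1 mo hmem (by omega) hmo
          have hstab : pvRelDeg up m p.1 = pvRelDeg up (pvMu up p.1) p.1 :=
            pv_relDeg_stable up node hpre (pvMu up p.1) p.1 hmem le_rfl m (pvMu up p.1)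
              (by omega) le_rfl
          have hd2 : (pvDegB up f mo p.1).2.items.foldl (pvBIn p) d
              = (pvRelDeg up m p.1).items.foldl (pvAIn p) d := by
            rw [hval, ← hstab, pv_inner_eq p _ d hnd]
          have hnd' : ((pvRelDeg up m p.1).items.foldl (pvAIn p) d).keys.Nodup :=
            pv_innerA_nodup p _ d hnd
          have := iht (fun x hx => hl x (List.mem_cons_of_mem p hx))
            (pvDegB up f mo p.1).1 ((pvDegB up f mo p.1).2.items.foldl (pvBIn p) d) hmo'
            (by rw [hd2]; exact hnd')
          rw [hd2] at this
          simp only [List.foldl_cons]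
          rw [hd2]
          exact this
      have hnd0 : (PySem.Dict.mk [((i : Int), (0 : Int))]).keys.Nodup := by
        simp [PySem.Dict.keys]
      obtain ⟨hval, hinv'⟩ := key (pvParents up i) (fun _ h => h) memo
        (PySem.Dict.mk [(i, 0)]) hinv hnd0
      have hrel : pvRelDeg up (pvMu up i) i
          = (pvParents up i).foldl (fun dd p => (pvRelDeg up m p.1).items.foldl (pvAIn p) dd)
              (PySem.Dict.mk [(i, 0)]) := by
        rw [hm]; rfl
      have h1 : pvDegB up (f + 1) memo i =
          (((pvParents up i).foldl
              (fun (st : PySem.Dict Int (PySem.Dict Int Int) × PySem.Dict Int Int) p =>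
                ((pvDegB up f st.1 p.1).1,
                 (pvDegB up f st.1 p.1).2.items.foldl (pvBIn p) st.2)) (memo, PySem.Dict.mk [(i, 0)])).1.insert i
            ((pvParents up i).foldl
              (fun (st : PySem.Dict Int (PySem.Dict Int Int) × PySem.Dict Int Int) p =>
                ((pvDegB up f st.1 p.1).1,
                 (pvDegB up f st.1 p.1).2.items.foldl (pvBIn p) st.2)) (memo, PySem.Dict.mk [(i, 0)])).2,
           ((pvParents up i).foldl
              (fun (st : PySem.Dict Int (PySem.Dict Int Int) × PySem.Dict Int Int) p =>
                ((pvDegB up f st.1 p.1).1,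
                 (pvDegB up f st.1 p.1).2.items.foldl (pvBIn p) st.2)) (memo, PySem.Dict.mk [(i, 0)])).2) := by
        simp only [pvDegB, hmi]
      rw [h1]
      refine ⟨by simpa using hval.trans hrel.symm, ?_⟩
      intro k v hkv
      rw [PySem.Dict.get?_insert] at hkv
      by_cases hk : k = i
      · rw [if_pos hk] at hkv
        subst hk
        cases hkv
        exact hval.trans hrel.symm
      · rw [if_neg hk] at hkv
        exact hinv' k v hkv

-- ---- A's selection scan = first open degree + filter ----

theorem pv_phase2 (up : List (Int × List (Int × Int))) :
    ∀ (s : List (Int × Int)) (m : Int) (S : PySem.Set Int),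
      S ≠ [] → (s.map Prod.fst).Nodup → (∀ ad ∈ s, ad.1 ∉ S) →
      (s.foldl (pvSelStep up) (m, S)).2
        = S ++ (s.filter (fun ad => pvIsOpen up ad.1 && (ad.2 == m))).map (fun ad => ad.1) := by
  intro s
  induction s with
  | nil => intro m S _ _ _; simp
  | cons ad t ih =>
    intro m S hS hnd hnin
    have hSe : S.isEmpty = false := by
      cases S with
      | nil => exact absurd rfl hS
      | cons a t => rfl
    have hstep : pvSelStep up (m, S) ad
        = if pvIsOpen up ad.1 && (ad.2 == m) then (ad.2, PySem.Set.add S ad.1) else (m, S) := by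
      simp only [pvSelStep, hSe, Bool.false_or]
    simp only [List.foldl_cons, hstep, List.filter_cons]
    by_cases hcond : (pvIsOpen up ad.1 && (ad.2 == m)) = true
    · have hm : ad.2 = m := by
        have h := hcond
        simp only [Bool.and_eq_true, beq_iff_eq] at h
        exact h.2
      have hadd : PySem.Set.add S ad.1 = S ++ [ad.1] :=
        PySem.Set.add_of_not_mem (hnin ad List.mem_cons_self)
      rw [if_pos hcond, if_pos hcond, hadd, hm]
      have hnd' : (t.map Prod.fst).Nodup := hnd.of_cons
      have hnin' : ∀ x ∈ t, x.1 ∉ S ++ [ad.1] := by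
        intro x hx hmem
        rcases List.mem_append.1 hmem with h | h
        · exact hnin x (List.mem_cons_of_mem ad hx) h
        · have hx1 : x.1 = ad.1 := by simpa using h
          have had : ad.1 ∉ t.map Prod.fst := by
            have h2 := hnd
            simp only [List.map_cons, List.nodup_cons] at h2
            exact h2.1
          exact had (hx1 ▸ List.mem_map_of_mem hx)
      rw [ih m (S ++ [ad.1]) (by simp) hnd' hnin']
      simp
    · rw [if_neg hcond, if_neg hcond]
      exact ih m S hS hnd.of_cons (fun x hx => hnin x (List.mem_cons_of_mem ad hx))

theorem pv_phase1 (up : List (Int × List (Int × Int))) :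
    ∀ (s : List (Int × Int)), (s.map Prod.fst).Nodup → ∀ (m0 : Int),
      (s.foldl (pvSelStep up) (m0, PySem.Set.empty)).2
        = match s.filter (fun ad => pvIsOpen up ad.1) with
          | [] => []
          | o :: _ => (s.filter (fun ad => pvIsOpen up ad.1 && (ad.2 == o.2))).map (fun ad => ad.1) := by
  intro s
  induction s with
  | nil => intro _ m0; rfl
  | cons ad t ih =>
    intro hnd m0
    cases hopen : pvIsOpen up ad.1 with
    | false =>
      have hstep : pvSelStep up (m0, PySem.Set.empty) ad = (m0, PySem.Set.empty) := by
        simp [pvSelStep, hopen]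
      simp only [List.foldl_cons, hstep, List.filter_cons, hopen, Bool.false_and,
        if_neg Bool.false_ne_true]
      exact ih hnd.of_cons m0
    | true =>
      have hstep : pvSelStep up (m0, PySem.Set.empty) ad = (ad.2, [ad.1]) := by
        simp [pvSelStep, hopen, PySem.Set.add, PySem.Set.empty, PySem.Set.contains]
      have hnin : ∀ x ∈ t, x.1 ∉ ([ad.1] : List Int) := by
        intro x hx hmem
        have hx1 : x.1 = ad.1 := by simpa using hmem
        have had : ad.1 ∉ t.map Prod.fst := by
          have := hnd
          simp only [List.map_cons, List.nodup_cons] at this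
          exact this.1
        exact had (hx1 ▸ List.mem_map_of_mem hx)
      simp only [List.foldl_cons, hstep, List.filter_cons, hopen]
      rw [pv_phase2 up t ad.2 [ad.1] (by simp) hnd.of_cons hnin]
      simp

-- ===== VERDICT placeholder =====
theorem pv_main (up : List (Int × List (Int × Int))) (node : Int)
    (hpre : Pre_get_first_open_ancestor_set up node) :
    get_first_open_ancestor_set up node = get_first_open_ancestor_set_alt up node := by
  have hmem := pv_mem_reach_self up node
  have hmu := pv_mu_le_bound up node
  have hinv0 : pvInv up PySem.Dict.empty := by
    intro k v h
    rw [PySem.Dict.get?_empty] at h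
    cases h
  obtain ⟨hB, -⟩ := pv_degB_spec up node hpre (pvBound up) node PySem.Dict.empty hmem hmu hinv0
  have hstab : pvRelDeg up (pvMu up node) node = pvRelDeg up (pvBound up) node :=
    pv_relDeg_stable up node hpre (pvMu up node) node hmem le_rfl _ _ le_rfl hmu
  rw [hstab] at hB
  have hnd : ((PySem.List.sorted (pvRelDeg up (pvBound up) node).items (fun x => x.2) false).map
      Prod.fst).Nodup := by
    have hperm : (PySem.List.sorted (pvRelDeg up (pvBound up) node).items (fun x => x.2) false).Perm
        (pvRelDeg up (pvBound up) node).items := PySem.List.sorted_perm _ _ _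
    have h1 : ((pvRelDeg up (pvBound up) node).items.map Prod.fst).Nodup := by
      have h2 := pv_relDeg_nodup up (pvBound up) node
      simpa [PySem.Dict.keys] using h2
    exact ((hperm.map Prod.fst).nodup_iff).2 h1
  simp only [get_first_open_ancestor_set, get_first_open_ancestor_set_alt]
  rw [hB]
  rw [pv_phase1 up _ hnd 0]
  cases hop : (PySem.List.sorted (pvRelDeg up (pvBound up) node).items (fun x => x.2) false).filter
      (fun ad => pvIsOpen up ad.1) with
  | nil => rfl
  | cons o rest =>
    show List.map (fun ad => ad.1)
        (List.filter (fun ad => pvIsOpen up ad.1 && ad.2 == o.2)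
          (PySem.List.sorted (pvRelDeg up (pvBound up) node).items fun x => x.2))
      = PySem.Set.ofList (List.map (fun ad => ad.1)
          (List.filter (fun ad => ad.2 == o.2) (o :: rest)))
    rw [← hop]
    rw [List.filter_filter]
    have hnd' : (((PySem.List.sorted (pvRelDeg up (pvBound up) node).items (fun x => x.2)
        false).filter (fun a => (a.2 == o.2) && pvIsOpen up a.1)).map Prod.fst).Nodup :=
      hnd.sublist (List.filter_sublist.map Prod.fst)
    rw [PySem.Set.ofList_eq_self_of_nodup (List.map (fun ad => ad.1)
      (List.filter (fun a => (a.2 == o.2) && pvIsOpen up a.1)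
        (PySem.List.sorted (pvRelDeg up (pvBound up) node).items fun x => x.2))) hnd']
    have hcg : (PySem.List.sorted (pvRelDeg up (pvBound up) node).items (fun x => x.2)
          false).filter (fun ad => pvIsOpen up ad.1 && (ad.2 == o.2))
        = (PySem.List.sorted (pvRelDeg up (pvBound up) node).items (fun x => x.2)
          false).filter (fun a => (a.2 == o.2) && pvIsOpen up a.1) :=
      List.filter_congr (fun a _ => Bool.and_comm _ _)
    rw [hcg]

theorem get_first_open_ancestor_set_spec : Claim_equal_get_first_open_ancestor_set := by
  intro up node _ hpre
  exact pv_main up node hpre
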